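-- pv_equiv track=rewrite | github.com/aryan-cs/sunday | backend/title_generation.py | _finalize_title_words
-- ===== SOURCE A (Python) =====
-- def _finalize_title_words(words: list[str]) -> str:
--     titled_words = [word.capitalize() for word in words]
--     if not titled_words:
--         return "Untitled Voice Note"
--
--     reasonable_title = " ".join(titled_words)
--     while len(titled_words) > 4 and (
--         len(titled_words) > 8 or len(reasonable_title) > 48
--     ):
--         titled_words = titled_words[:-1]
--         reasonable_title = " ".join(titled_words)
--
--     return reasonable_title
-- ===== SOURCE B (Python) =====
-- def _finalize_title_words(words: list[str]) -> str:
--     titled = [word.capitalize() for word in words]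
--     if not titled:
--         return "Untitled Voice Note"
--     if len(titled) <= 4:
--         return " ".join(titled)
--     kept = titled[:4]
--     cur = sum(len(w) for w in kept) + 3
--     for word in titled[4:8]:
--         new = cur + 1 + len(word)
--         if new > 48:
--             break
--         kept.append(word)
--         cur = new
--     return " ".join(kept)
-- ===== Notes on version B (the rewrite author's own statement) =====
-- stated objective: faster
-- what changed: Replaces A's trim-from-end loop, which re-joins the whole list and re-measures the full title on every iteration, with a single forward pass that keeps the first four capitalized words and then adds words five to eight while a running length counter stays within the 48-character budget.
import Mathlib
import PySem

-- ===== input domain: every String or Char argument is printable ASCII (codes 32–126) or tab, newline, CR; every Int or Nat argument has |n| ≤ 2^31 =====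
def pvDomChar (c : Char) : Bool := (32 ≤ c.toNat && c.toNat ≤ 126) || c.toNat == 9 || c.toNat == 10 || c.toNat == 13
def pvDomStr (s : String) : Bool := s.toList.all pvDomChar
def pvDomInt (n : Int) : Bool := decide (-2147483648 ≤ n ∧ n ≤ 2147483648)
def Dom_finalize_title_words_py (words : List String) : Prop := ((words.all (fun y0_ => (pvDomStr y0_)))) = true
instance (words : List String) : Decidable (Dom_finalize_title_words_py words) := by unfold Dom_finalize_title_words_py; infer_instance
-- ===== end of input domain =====

-- B builds the title forward under the length/count budget (one pass, no repeated re-joins)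
-- instead of A's trim-from-end loop that re-joins the whole list each iteration; objective: faster (constant factor).


-- ===== PORT A =====
-- str.capitalize(): first char upper-cased, rest lower-cased (exact on the ASCII domain; shared by both ports)
def pyCapitalize (s : String) : String :=
  match s.toList with
  | [] => s
  | c :: rest => String.ofList (PySem.Chars.upperChar c :: PySem.Chars.lower rest)

-- the while loop of A: state = (titled_words, reasonable_title)
def aLoop (t : List String) (title : String) : String :=
  if 4 < t.length ∧ (8 < t.length ∨ 48 < PySem.Str.len title) then
    let t' := PySem.List.slice t none (some (-1))       -- titled_words[:-1]
    aLoop t' (PySem.Str.join " " t')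
  else title
termination_by t.length
decreasing_by
  simp only [PySem.List.slice_to_neg_one, List.length_dropLast]
  omega

def finalize_title_words_py (words : List String) : String :=
  let titled_words := words.map pyCapitalize
  if titled_words = [] then "Untitled Voice Note"
  else aLoop titled_words (PySem.Str.join " " titled_words)

-- ===== PORT B =====
-- the for loop of B: keep appending words while the running joined length stays ≤ 48
def bLoop : List String → List String → Int → List String
  | [], kept, _ => kept
  | w :: ws, kept, cur =>
    let new := cur + 1 + PySem.Str.len w
    if 48 < new then kept else bLoop ws (kept ++ [w]) new

def finalize_title_words_py_alt (words : List String) : String :=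
  let titled := words.map pyCapitalize
  if titled = [] then "Untitled Voice Note"
  else if titled.length ≤ 4 then PySem.Str.join " " titled
  else
    let kept := titled.take 4                            -- titled[:4]
    let cur := (kept.foldl (fun a w => a + PySem.Str.len w) 0) + 3
    PySem.Str.join " " (bLoop (PySem.List.slice titled (some 4) (some 8)) kept cur)

-- ===== PRECONDITION & SPEC =====
def Spec_finalize_title_words_py (words : List String) (out : String) : Prop := out = finalize_title_words_py_alt words
instance (words : List String) (out : String) : Decidable (Spec_finalize_title_words_py words out) := by unfold Spec_finalize_title_words_py; infer_instance

-- ===== CLAIM (what is proved, stated in full; the proofs are below) =====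
def Claim_equal_finalize_title_words_py : Prop := ∀ (words : List String), Dom_finalize_title_words_py words → Spec_finalize_title_words_py words (finalize_title_words_py words)

-- ===== LEMMAS AND PROOFS =====

-- length of " ".join(l), on the Nat side
def J (l : List String) : Nat := (PySem.Chars.join [' '] (l.map String.toList)).length


lemma J_singleton (w : String) : J [w] = w.toList.length := by
  simp [J, PySem.Chars.join_singleton]

lemma J_cons_cons (a b : String) (r : List String) :
    J (a :: b :: r) = a.toList.length + 1 + J (b :: r) := by
  simp [J, PySem.Chars.join_cons_cons]
  omega

lemma len_join (t : List String) : PySem.Str.len (PySem.Str.join " " t) = (J t : Int) := by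
  simp [PySem.Str.len_eq, PySem.Str.toList_join, J]

lemma J_append_singleton (l : List String) (hl : l ≠ []) (w : String) :
    J (l ++ [w]) = J l + 1 + w.toList.length := by
  induction l with
  | nil => simp at hl
  | cons a l ih =>
    cases l with
    | nil => simp [J_cons_cons, J_singleton]
    | cons b r =>
      have := ih (by simp)
      simp only [List.cons_append, J_cons_cons] at *
      omega

lemma J_take_succ (t : List String) (j : Nat) (h1 : 1 ≤ j) (h2 : j < t.length) :
    J (t.take (j+1)) = J (t.take j) + 1 + t[j].toList.length := by
  have htake : t.take (j+1) = t.take j ++ [t[j]] := List.take_succ_eq_append_getElem h2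
  rw [htake, J_append_singleton]
  intro h
  rw [List.take_eq_nil_iff] at h
  rcases h with h | h
  · omega
  · subst h; simp at h2

lemma J_take_mono (t : List String) (i k : Nat) (h1 : 1 ≤ i) (hik : i ≤ k) (hk : k ≤ t.length) :
    J (t.take i) ≤ J (t.take k) := by
  induction k with
  | zero => omega
  | succ k ih =>
    rcases Nat.lt_or_ge i (k+1) with h | h
    · have := ih (by omega) (by omega)
      have hs := J_take_succ t k (by omega) (by omega)
      omega
    · have : i = k + 1 := by omega
      subst this; exact le_refl _

-- pure-list version of A's loop
def atrim (t : List String) : List String :=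
  if 4 < t.length ∧ (8 < t.length ∨ 48 < J t) then atrim t.dropLast else t
termination_by t.length
decreasing_by simp [List.length_dropLast]; omega

lemma aLoop_atrim (t : List String) : aLoop t (PySem.Str.join " " t) = PySem.Str.join " " (atrim t) := by
  induction t using atrim.induct with
  | case1 t hc ih =>
    rw [aLoop, atrim]
    simp only [PySem.List.slice_to_neg_one, len_join]
    have hc' : 4 < t.length ∧ (8 < t.length ∨ (48:Int) < (J t : Int)) := by
      exact ⟨hc.1, by rcases hc.2 with h | h; exacts [Or.inl h, Or.inr (by exact_mod_cast h)]⟩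
    rw [if_pos hc', if_pos hc]
    exact ih
  | case2 t hc =>
    rw [aLoop, atrim]
    have hc' : ¬ (4 < t.length ∧ (8 < t.length ∨ (48:Int) < PySem.Str.len (PySem.Str.join " " t))) := by
      rw [len_join]
      intro ⟨h1, h2⟩
      exact hc ⟨h1, by rcases h2 with h | h; exacts [Or.inl h, Or.inr (by exact_mod_cast h)]⟩
    rw [if_neg hc', if_neg hc]

-- A's loop stops exactly at the longest prefix within the count budget whose joined length fits
lemma atrim_spec (t : List String) (j : Nat) (hj4 : 4 ≤ j) (hjm : j ≤ min 8 t.length)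
    (hgood : j = 4 ∨ J (t.take j) ≤ 48)
    (hstop : j = min 8 t.length ∨ 48 < J (t.take (j+1))) :
    atrim t = t.take j := by
  induction t using atrim.induct with
  | case1 t hc ih =>
    rw [atrim, if_pos hc]
    have hn : 4 < t.length := hc.1
    by_cases h8 : 8 < t.length
    · have htk : ∀ k, k ≤ 8 → t.dropLast.take k = t.take k := by
        intro k hk
        rw [List.dropLast_eq_take, List.take_take]
        congr 1; omega
      have hjm' : j ≤ min 8 t.dropLast.length := by simp [List.length_dropLast]; omega
      have hgood' : j = 4 ∨ J (t.dropLast.take j) ≤ 48 := by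
        rcases hgood with h | h
        · exact Or.inl h
        · exact Or.inr (by rw [htk j (by omega)]; exact h)
      have hstop' : j = min 8 t.dropLast.length ∨ 48 < J (t.dropLast.take (j+1)) := by
        rcases hstop with h | h
        · left; simp [List.length_dropLast]; omega
        · by_cases hj8 : j < 8
          · right; rw [htk (j+1) (by omega)]; exact h
          · left; simp [List.length_dropLast]; omega
      rw [ih hjm' hgood' hstop', htk j (by omega)]
    · have hJ : 48 < J t := by rcases hc.2 with h | h; exacts [absurd h h8, h]
      have hjlt : j < t.length := by
        by_contra hge
        have hje : j = t.length := by omega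
        rcases hgood with h | h
        · omega
        · rw [hje, List.take_length] at h; omega
      have htk : ∀ k, k ≤ t.length - 1 → t.dropLast.take k = t.take k := by
        intro k hk
        rw [List.dropLast_eq_take, List.take_take]
        congr 1; omega
      have hjm' : j ≤ min 8 t.dropLast.length := by simp [List.length_dropLast]; omega
      have hgood' : j = 4 ∨ J (t.dropLast.take j) ≤ 48 := by
        rcases hgood with h | h
        · exact Or.inl h
        · exact Or.inr (by rw [htk j (by omega)]; exact h)
      have hstop' : j = min 8 t.dropLast.length ∨ 48 < J (t.dropLast.take (j+1)) := by
        by_cases hjl : j < t.length - 1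
        · rcases hstop with h | h
          · exfalso; omega
          · right; rw [htk (j+1) (by omega)]; exact h
        · left; simp [List.length_dropLast]; omega
      rw [ih hjm' hgood' hstop', htk j (by omega)]
  | case2 t hc =>
    rw [atrim, if_neg hc]
    push_neg at hc
    by_cases hn : 4 < t.length
    · obtain ⟨h8, hJ⟩ := hc hn
      have hje : j = t.length := by
        by_contra hne
        have hjlt : j < t.length := by omega
        rcases hstop with h | h
        · omega
        · have hm := J_take_mono t (j+1) t.length (by omega) (by omega) (le_refl _)
          rw [List.take_length] at hm
          omega
      rw [hje, List.take_length]
    · have hje : j = t.length := by omega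
      rw [hje, List.take_length]

lemma bLoop_atrim (t : List String) (rest kept : List String) (j : Nat)
    (hj4 : 4 ≤ j) (hjm : j ≤ min 8 t.length)
    (hkept : kept = t.take j) (hrest : rest = (t.take 8).drop j)
    (hgood : j = 4 ∨ J (t.take j) ≤ 48) :
    bLoop rest kept (J (t.take j)) = atrim t := by
  induction rest generalizing kept j with
  | nil =>
    have hlen : (t.take 8).length ≤ j := by
      rw [← List.drop_eq_nil_iff]; exact hrest.symm
    have hje : j = min 8 t.length := by
      simp [List.length_take] at hlen; omega
    rw [bLoop, hkept, atrim_spec t j hj4 hjm hgood (Or.inl hje)]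
  | cons w ws ih =>
    have hjlt : j < min 8 t.length := by
      by_contra h
      have hje : j = min 8 t.length := by omega
      have : (t.take 8).drop j = [] := by
        apply List.drop_eq_nil_of_le
        simp [List.length_take]; omega
      rw [this] at hrest; exact absurd hrest.symm (by simp)
    have hjt : j < t.length := by omega
    have hlt8 : j < (t.take 8).length := by simp [List.length_take]; omega
    have h1 := List.drop_eq_getElem_cons hlt8
    rw [h1] at hrest
    injection hrest with hw0 hws
    have hw : w = t[j]'hjt := by rw [hw0]; exact List.getElem_take ..
    clear hw0
    have hnew : (J (t.take j) : Int) + 1 + PySem.Str.len w = (J (t.take (j+1)) : Int) := by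
      rw [J_take_succ t j (by omega) hjt, hw, PySem.Str.len_eq]
      push_cast; ring
    rw [bLoop]
    simp only [hnew]
    by_cases hgt : 48 < J (t.take (j+1))
    · rw [if_pos (by exact_mod_cast hgt), hkept]
      exact (atrim_spec t j hj4 hjm hgood (Or.inr hgt)).symm
    · rw [if_neg (by push_neg at hgt ⊢; exact_mod_cast hgt)]
      exact ih (kept ++ [w]) (j+1) (by omega) (by omega)
        (by rw [hkept, hw, List.take_succ_eq_append_getElem hjt])
        hws (Or.inr (by omega))

-- the initial counter of B equals J of the first four words
lemma cur_eq_J (a b c d : String) (r : List String) :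
    (([a,b,c,d] : List String).foldl (fun acc w => acc + PySem.Str.len w) 0) + 3
      = (J ((a :: b :: c :: d :: r).take 4) : Int) := by
  simp [List.foldl, PySem.Str.len_eq, J_cons_cons, J_singleton, List.take]
  ring

-- ===== VERDICT (by name: the statement is the Claim_ definition above) =====
theorem finalize_title_words_py_spec : Claim_equal_finalize_title_words_py := by
  intro words _
  unfold Spec_finalize_title_words_py finalize_title_words_py finalize_title_words_py_alt
  set t := words.map pyCapitalize with ht
  by_cases hnil : t = []
  · simp [hnil]
  · rw [if_neg hnil, if_neg hnil]
    by_cases hle : t.length ≤ 4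
    · rw [if_pos hle, aLoop, if_neg (by push_neg; intro h; omega)]
    · rw [if_neg hle]
      push_neg at hle
      rcases t with _ | ⟨a, _ | ⟨b, _ | ⟨c, _ | ⟨d, r⟩⟩⟩⟩ <;> simp at hle
      have htake4 : (a :: b :: c :: d :: r).take 4 = [a,b,c,d] := by simp [List.take]
      have hslice : PySem.List.slice (a :: b :: c :: d :: r) (some 4) (some 8)
          = ((a :: b :: c :: d :: r).take 8).drop 4 := by
        rw [PySem.List.slice_toNat _ (by norm_num) (by norm_num), List.drop_take]
        rfl
      show aLoop _ (PySem.Str.join " " _)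
          = PySem.Str.join " " (bLoop (PySem.List.slice (a :: b :: c :: d :: r) (some 4) (some 8))
              ((a :: b :: c :: d :: r).take 4)
              (((a :: b :: c :: d :: r).take 4).foldl (fun acc w => acc + PySem.Str.len w) 0 + 3))
      rw [aLoop_atrim, hslice]
      rw [show (((a :: b :: c :: d :: r).take 4).foldl (fun acc w => acc + PySem.Str.len w) 0) + 3
            = (J ((a :: b :: c :: d :: r).take 4) : Int) from cur_eq_J a b c d r]
      rw [bLoop_atrim (a :: b :: c :: d :: r) _ _ 4 (le_refl _) (by simp) rfl rfl (Or.inl rfl)]
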